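-- pv_equiv track=rewrite | github.com/KumaTea/friends-map | map.py | index_user
-- ===== SOURCE A (Python) =====
-- def index_user(r_map: dict):
--     u_index = {}
--     # Generate a dict, key is the lowercase of username, value is the index of the node
--     index = 1
--     for u in r_map:
--         if u not in u_index:
--             u_index[u] = index
--             index += 1
--         for t in r_map[u]:
--             if t not in u_index:
--                 u_index[t] = index
--                 index += 1
--     return u_index
-- ===== SOURCE B (Python) =====
-- def index_user(r_map: dict):
--     # Flatten the whole map into one mention list (keys interleaved with targets).
--     flat = []
--     for u, ts in r_map.items():
--         flat.append(u)
--         flat.extend(ts)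
--     # Position of each node's first mention: building over reversed(enumerate)
--     # means the earliest index is written last and therefore wins.
--     pos = {x: i for i, x in reversed(list(enumerate(flat)))}
--     # Rank the distinct nodes by first-mention position and number them from 1.
--     nodes = sorted(set(flat), key=lambda x: pos[x])
--     return {x: i for i, x in enumerate(nodes, 1)}
-- ===== Notes on version B (the rewrite author's own statement) =====
-- stated objective: alternative
-- what changed: Instead of one interleaved pass maintaining a dict and a manual counter, B flattens the map into a mention list, builds a first-mention position table from reversed(enumerate(flat)) by overwrite, ranks the distinct nodes by sorting on that position, and numbers the sorted list from 1.
import Mathlib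
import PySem

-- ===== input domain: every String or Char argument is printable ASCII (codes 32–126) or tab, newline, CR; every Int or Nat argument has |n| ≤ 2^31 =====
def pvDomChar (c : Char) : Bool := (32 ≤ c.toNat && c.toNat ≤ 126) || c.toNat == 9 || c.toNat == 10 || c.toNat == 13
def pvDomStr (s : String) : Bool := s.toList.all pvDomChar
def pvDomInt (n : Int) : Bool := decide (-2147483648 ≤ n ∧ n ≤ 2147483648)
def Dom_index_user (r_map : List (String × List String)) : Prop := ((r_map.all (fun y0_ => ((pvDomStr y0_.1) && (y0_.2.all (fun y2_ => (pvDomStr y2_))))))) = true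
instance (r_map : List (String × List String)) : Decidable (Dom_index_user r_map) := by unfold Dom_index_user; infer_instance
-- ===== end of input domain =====

-- B replaces A's interleaved counter-maintaining pass by flatten + position table + sort-by-first-mention + enumerate; equal results, not faster.

-- ===== PORT A =====
-- one step of A's body: 'if x not in u_index: u_index[x] = index; index += 1'
def iuStep (st : PySem.Dict String Int × Int) (x : String) : PySem.Dict String Int × Int :=
  if st.1.contains x = false then (st.1.insert x st.2, st.2 + 1) else st

def index_user (r_map : List (String × List String)) : List (String × Int) :=
  ((PySem.Dict.ofList r_map).items.foldl (fun st uts => uts.2.foldl iuStep (iuStep st uts.1))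
      (PySem.Dict.empty, (1 : Int))).1.items

-- ===== PORT B =====
-- phase 1 of Source B: flatten the map into the mention list
def iuFlat (r_map : List (String × List String)) : List String :=
  (PySem.Dict.ofList r_map).items.foldl (fun acc uts => (acc ++ [uts.1]) ++ uts.2) []

-- Source B's 'pos = {x: i for i, x in reversed(list(enumerate(flat)))}'
def iuPos (flat : List String) : PySem.Dict String Int :=
  ((PySem.List.enumerate flat 0).reverse).foldl
    (fun (d : PySem.Dict String Int) p => d.insert p.2 p.1) PySem.Dict.empty

-- Source B's sort key 'pos[x]'; exact because every element of set(flat) is a key of pos,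
-- so the lookup never misses and the default is never used.
def iuKey (flat : List String) (x : String) : Int := (iuPos flat).getD x 0

-- phase 2 of Source B: distinct nodes, sorted by first-mention position
def iuNodes (flat : List String) : List String :=
  PySem.List.sorted (PySem.Set.ofList flat) (iuKey flat) false

def index_user_alt (r_map : List (String × List String)) : List (String × Int) :=
  ((PySem.List.enumerate (iuNodes (iuFlat r_map)) 1).foldl
      (fun (res : PySem.Dict String Int) p => res.insert p.2 p.1) PySem.Dict.empty).items

-- ===== PRECONDITION & SPEC =====
def Spec_index_user (r_map : List (String × List String)) (out : List (String × Int)) : Prop := out = index_user_alt r_map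
instance (r_map : List (String × List String)) (out : List (String × Int)) : Decidable (Spec_index_user r_map out) := by unfold Spec_index_user; infer_instance

-- ===== CLAIM (what is proved, stated in full; the proofs are below) =====
def Claim_equal_index_user : Prop := ∀ (r_map : List (String × List String)), Dom_index_user r_map → Spec_index_user r_map (index_user r_map)

-- ===== LEMMAS AND PROOFS =====

-- the first occurrences, in order, among xs of elements not in 'seen'
def iuNews : List String → List String → List String
  | [], _ => []
  | x :: xs, seen => if x ∈ seen then iuNews xs seen else x :: iuNews xs (x :: seen)

-- the first-occurrence index of x in xs, as a plain Nat (proof-side view of the sort key)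
def iuIdx (xs : List String) (x : String) : Nat := (PySem.List.index? xs x).getD 0

theorem iuNews_congr (xs : List String) (s1 s2 : List String)
    (h : ∀ a, a ∈ s1 ↔ a ∈ s2) : iuNews xs s1 = iuNews xs s2 := by
  induction xs generalizing s1 s2 with
  | nil => rfl
  | cons x xs ih =>
    by_cases hx : x ∈ s1
    · simp only [iuNews, if_pos hx, if_pos ((h x).mp hx)]
      exact ih s1 s2 h
    · have hx2 : x ∉ s2 := fun hc => hx ((h x).mpr hc)
      simp only [iuNews, if_neg hx, if_neg hx2]
      exact congrArg _ (ih (x :: s1) (x :: s2) (by intro a; simp [h a]))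

theorem iuNews_update (xs seen : List String) :
    PySem.Set.update seen xs = seen ++ iuNews xs seen := by
  induction xs generalizing seen with
  | nil => simp [PySem.Set.update, iuNews]
  | cons x xs ih =>
    by_cases hx : x ∈ seen
    · have : PySem.Set.add seen x = seen := by
        simp [PySem.Set.add, PySem.Set.contains, hx]
      simp only [PySem.Set.update, List.foldl_cons, this, iuNews, if_pos hx]
      exact ih seen
    · have hadd : PySem.Set.add seen x = seen ++ [x] := by
        simp [PySem.Set.add, PySem.Set.contains, hx]
      have := ih (seen ++ [x])
      simp only [PySem.Set.update, List.foldl_cons, hadd]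
      simp only [PySem.Set.update] at this
      rw [this, iuNews_congr xs (seen ++ [x]) (x :: seen) (by intro a; simp; tauto)]
      simp [iuNews, hx]

theorem iuNews_dedup (xs : List String) : iuNews xs [] = PySem.List.dedup xs := by
  have h := iuNews_update xs []
  simp only [List.nil_append] at h
  rw [PySem.List.dedup_eq_ofList, PySem.Set.ofList_eq_foldl]
  simp only [PySem.Set.update] at h
  exact h.symm

theorem mem_iuNews (xs seen : List String) (a : String) (h : a ∈ iuNews xs seen) :
    a ∈ xs ∧ a ∉ seen := by
  induction xs generalizing seen with
  | nil => simp [iuNews] at h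
  | cons x xs ih =>
    by_cases hx : x ∈ seen
    · simp only [iuNews, if_pos hx] at h
      have := ih seen h
      exact ⟨List.mem_cons_of_mem _ this.1, this.2⟩
    · simp only [iuNews, if_neg hx] at h
      rcases List.mem_cons.mp h with h | h
      · exact ⟨h ▸ List.mem_cons_self, h ▸ hx⟩
      · have := ih (x :: seen) h
        exact ⟨List.mem_cons_of_mem _ this.1, fun hc => this.2 (List.mem_cons_of_mem _ hc)⟩

-- along iuNews xs seen, the first-mention positions in xs are strictly increasing
theorem iuNews_pairwise_idx (xs seen : List String) :
    (iuNews xs seen).Pairwise (fun a b => iuIdx xs a < iuIdx xs b) := by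
  induction xs generalizing seen with
  | nil => simp [iuNews]
  | cons x xs ih =>
    by_cases hx : x ∈ seen
    · simp only [iuNews, if_pos hx]
      refine List.Pairwise.imp_of_mem ?_ (ih seen)
      intro a b ha hb hab
      have haxs := (mem_iuNews xs seen a ha).1
      have hbxs := (mem_iuNews xs seen b hb).1
      have hax : x ≠ a := fun hc => (mem_iuNews xs seen a ha).2 (hc ▸ hx)
      have hbx : x ≠ b := fun hc => (mem_iuNews xs seen b hb).2 (hc ▸ hx)
      have ha' : PySem.List.index? xs a ≠ none :=
        fun hc => ((PySem.List.index?_eq_none_iff _ _).mp hc) haxs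
      have hb' : PySem.List.index? xs b ≠ none :=
        fun hc => ((PySem.List.index?_eq_none_iff _ _).mp hc) hbxs
      unfold iuIdx at *
      rw [PySem.List.index?_cons_of_ne _ hax, PySem.List.index?_cons_of_ne _ hbx]
      cases h1 : PySem.List.index? xs a with
      | none => exact absurd h1 ha'
      | some ka =>
        cases h2 : PySem.List.index? xs b with
        | none => exact absurd h2 hb'
        | some kb =>
          simp only [h1, h2, Option.map_some, Option.getD_some] at hab ⊢
          omega
    · simp only [iuNews, if_neg hx]
      constructor
      · intro b hb
        have hbxs := (mem_iuNews xs (x :: seen) b hb).1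
        have hbx : x ≠ b := fun hc =>
          (mem_iuNews xs (x :: seen) b hb).2 (hc ▸ List.mem_cons_self)
        have hb' : PySem.List.index? xs b ≠ none :=
          fun hc => ((PySem.List.index?_eq_none_iff _ _).mp hc) hbxs
        unfold iuIdx
        rw [PySem.List.index?_cons_self, PySem.List.index?_cons_of_ne _ hbx]
        cases h2 : PySem.List.index? xs b with
        | none => exact absurd h2 hb'
        | some kb => simp
      · refine List.Pairwise.imp_of_mem ?_ (ih (x :: seen))
        intro a b ha hb hab
        have haxs := (mem_iuNews xs (x :: seen) a ha).1
        have hbxs := (mem_iuNews xs (x :: seen) b hb).1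
        have hax : x ≠ a := fun hc =>
          (mem_iuNews xs (x :: seen) a ha).2 (hc ▸ List.mem_cons_self)
        have hbx : x ≠ b := fun hc =>
          (mem_iuNews xs (x :: seen) b hb).2 (hc ▸ List.mem_cons_self)
        have ha' : PySem.List.index? xs a ≠ none :=
          fun hc => ((PySem.List.index?_eq_none_iff _ _).mp hc) haxs
        have hb' : PySem.List.index? xs b ≠ none :=
          fun hc => ((PySem.List.index?_eq_none_iff _ _).mp hc) hbxs
        unfold iuIdx at *
        rw [PySem.List.index?_cons_of_ne _ hax, PySem.List.index?_cons_of_ne _ hbx]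
        cases h1 : PySem.List.index? xs a with
        | none => exact absurd h1 ha'
        | some ka =>
          cases h2 : PySem.List.index? xs b with
          | none => exact absurd h2 hb'
          | some kb =>
            simp only [h1, h2, Option.map_some, Option.getD_some] at hab ⊢
            omega

-- the dict built by folding value-keyed inserts: lookup = last matching pair, i.e. first of the reverse
theorem iu_get?_foldl_insert (ps : List (Int × String)) (d : PySem.Dict String Int) (x : String) :
    (ps.foldl (fun (d : PySem.Dict String Int) p => d.insert p.2 p.1) d).get? x
      = ((ps.reverse.find? (fun p => p.2 == x)).map (·.1)).or (d.get? x) := by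
  induction ps generalizing d with
  | nil => simp
  | cons p ps ih =>
    rw [List.foldl_cons, ih]
    simp only [List.reverse_cons, List.find?_append]
    cases hf : ps.reverse.find? (fun p => p.2 == x) with
    | some q => simp
    | none =>
      by_cases hpx : p.2 = x
      · subst hpx
        simp [PySem.Dict.get?_insert_self, List.find?]
      · have hbx : (p.2 == x) = false := beq_eq_false_iff_ne.mpr hpx
        rw [PySem.Dict.get?_insert_of_ne _ _ (Ne.symm hpx)]
        simp [List.find?, hbx]

-- the first matching pair of enumerate is the first-occurrence index
theorem iu_find?_enumerate (xs : List String) (x : String) (s : Int) :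
    (PySem.List.enumerate xs s).find? (fun p => p.2 == x)
      = (PySem.List.index? xs x).map (fun k => ((s + k : Int), x)) := by
  induction xs generalizing s with
  | nil => simp [PySem.List.enumerate]
  | cons y ys ih =>
    rw [PySem.List.enumerate_cons]
    by_cases hyx : y = x
    · subst hyx
      rw [PySem.List.index?_cons_self]
      simp [List.find?]
    · rw [PySem.List.index?_cons_of_ne _ (by exact hyx)]
      simp only [List.find?]
      have : ((s, y).2 == x) = false := by simpa using hyx
      rw [this, ih (s + 1)]
      cases PySem.List.index? ys x with
      | none => simp
      | some k => simp; ring_nf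

-- on members of flat, Source B's sort key pos[x] is the first-occurrence index
theorem iuKey_eq_iuIdx (flat : List String) (x : String) (hx : x ∈ flat) :
    iuKey flat x = ((iuIdx flat x : Nat) : Int) := by
  unfold iuKey iuPos iuIdx
  rw [PySem.Dict.getD_eq_get?_getD, iu_get?_foldl_insert, List.reverse_reverse,
      iu_find?_enumerate, PySem.Dict.get?_empty]
  cases h : PySem.List.index? flat x with
  | none => exact absurd ((PySem.List.index?_eq_none_iff _ _).mp h) (by simpa using hx)
  | some k => simp

-- strict increase transfers from iuIdx to Source B's key
theorem iuNews_pairwise_key (flat : List String) :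
    (iuNews flat []).Pairwise (fun a b => iuKey flat a < iuKey flat b) := by
  refine List.Pairwise.imp_of_mem ?_ (iuNews_pairwise_idx flat [])
  intro a b ha hb hab
  rw [iuKey_eq_iuIdx flat a (mem_iuNews flat [] a ha).1,
      iuKey_eq_iuIdx flat b (mem_iuNews flat [] b hb).1]
  exact_mod_cast hab

-- sorting the distinct nodes by first-mention position reproduces first-occurrence order
theorem iu_sorted (flat : List String) : iuNodes flat = iuNews flat [] := by
  have hd : iuNews flat [] = PySem.Set.ofList flat := by
    rw [iuNews_dedup, PySem.List.dedup_eq_ofList]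
  exact PySem.List.sorted_eq_of_perm_of_pairwise_lt _ _ _
    (by rw [hd]) (iuNews_pairwise_key flat)

theorem iu_flat (items : List (String × List String)) (st : PySem.Dict String Int × Int) :
    items.foldl (fun st uts => uts.2.foldl iuStep (iuStep st uts.1)) st
      = (items.flatMap (fun uts => uts.1 :: uts.2)).foldl iuStep st := by
  induction items generalizing st with
  | nil => rfl
  | cons u rest ih => simp [List.foldl_append, ih]

theorem iu_order (items : List (String × List String)) (acc : List String) :
    items.foldl (fun acc uts => (acc ++ [uts.1]) ++ uts.2) acc
      = acc ++ items.flatMap (fun uts => uts.1 :: uts.2) := by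
  induction items generalizing acc with
  | nil => simp
  | cons u rest ih => simp [List.flatMap]

theorem iu_main (xs : List String) (d : PySem.Dict String Int) (c : Int) :
    xs.foldl iuStep (d, c)
      = ((PySem.List.enumerate (iuNews xs d.keys) c).foldl
            (fun (res : PySem.Dict String Int) p => res.insert p.2 p.1) d,
         c + (iuNews xs d.keys).length) := by
  induction xs generalizing d c with
  | nil => simp [iuNews]
  | cons x xs ih =>
    by_cases hx : d.contains x = true
    · have hmem : x ∈ d.keys := (PySem.Dict.contains_iff_mem_keys d x).mp hx
      have hstep : iuStep (d, c) x = (d, c) := by simp [iuStep, hx]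
      simp only [List.foldl_cons, hstep, iuNews, if_pos hmem]
      exact ih d c
    · have hx' : d.contains x = false := by simpa using hx
      have hmem : x ∉ d.keys := fun hc =>
        hx ((PySem.Dict.contains_iff_mem_keys d x).mpr hc)
      have hstep : iuStep (d, c) x = (d.insert x c, c + 1) := by simp [iuStep, hx']
      simp only [List.foldl_cons, hstep, iuNews, if_neg hmem]
      rw [ih (d.insert x c) (c + 1)]
      have hkeys : iuNews xs (d.insert x c).keys = iuNews xs (x :: d.keys) := by
        apply iuNews_congr
        intro a
        rw [PySem.Dict.mem_keys_insert]
        simp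
      rw [hkeys, PySem.List.enumerate_cons, List.foldl_cons]
      simp only [Prod.mk.injEq]
      exact ⟨trivial, by simp; omega⟩

-- ===== VERDICT (by name: the statement is the Claim_ definition above) =====
theorem index_user_spec : Claim_equal_index_user := by
  unfold Claim_equal_index_user
  intro r_map _
  unfold Spec_index_user index_user index_user_alt iuFlat
  rw [iu_flat, iu_order, iu_sorted, iu_main]
  simp [PySem.Dict.keys_empty]
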